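-- pv_equiv track=rewrite | github.com/DG2609/agentic_vs | agent/tools/cost_tracker.py | _normalize_model
-- ===== SOURCE A (Python) =====
-- MODEL_COSTS: dict[str, dict[str, float]] = {
--     # Anthropic
--     "claude-opus-4-6":     {"input": 30.0,  "output": 150.0, "cache_read": 3.0,   "cache_write": 7.5},
--     "claude-sonnet-4-6":   {"input": 3.0,   "output": 15.0,  "cache_read": 0.3,   "cache_write": 0.75},
--     "claude-haiku-4-5":    {"input": 0.8,   "output": 4.0,   "cache_read": 0.08,  "cache_write": 0.2},
--     # Aliases for backward compat
--     "claude-3-opus":       {"input": 30.0,  "output": 150.0, "cache_read": 3.0,   "cache_write": 7.5},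
--     "claude-3-sonnet":     {"input": 3.0,   "output": 15.0,  "cache_read": 0.3,   "cache_write": 0.75},
--     "claude-3-haiku":      {"input": 0.8,   "output": 4.0,   "cache_read": 0.08,  "cache_write": 0.2},
--     # OpenAI
--     "gpt-4o":              {"input": 5.0,   "output": 15.0,  "cache_read": 2.5,   "cache_write": 0.0},
--     "gpt-4o-mini":         {"input": 0.15,  "output": 0.6,   "cache_read": 0.075, "cache_write": 0.0},
--     "gpt-4-turbo":         {"input": 10.0,  "output": 30.0,  "cache_read": 0.0,   "cache_write": 0.0},
--     # Google Gemini
--     "gemini-1.5-pro":      {"input": 3.5,   "output": 10.5,  "cache_read": 0.875, "cache_write": 0.0},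
--     "gemini-1.5-flash":    {"input": 0.075, "output": 0.3,   "cache_read": 0.01875, "cache_write": 0.0},
--     # Groq (free tier / varies)
--     "llama3-70b-8192":     {"input": 0.59,  "output": 0.79,  "cache_read": 0.0,   "cache_write": 0.0},
--     "mixtral-8x7b-32768":  {"input": 0.24,  "output": 0.24,  "cache_read": 0.0,   "cache_write": 0.0},
--     # Ollama (self-hosted, no cost)
--     "ollama":              {"input": 0.0,   "output": 0.0,   "cache_read": 0.0,   "cache_write": 0.0},
-- }
--
-- def _normalize_model(model: str) -> str:
--     """Normalize model name for lookup — case-insensitive prefix matching."""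
--     if not model:
--         return ""
--     model_lower = model.lower()
--     # Exact match
--     if model_lower in MODEL_COSTS:
--         return model_lower
--     # Prefix match (e.g. "claude-sonnet-4-6-20250101" → "claude-sonnet-4-6")
--     for key in MODEL_COSTS:
--         if model_lower.startswith(key):
--             return key
--     # Pattern match: "claude-opus" → "claude-opus-4-6", "gpt-4o" → exact, etc.
--     if "ollama" in model_lower:
--         return "ollama"
--     if "gemini-1.5-pro" in model_lower:
--         return "gemini-1.5-pro"
--     if "gemini-1.5-flash" in model_lower:
--         return "gemini-1.5-flash"
--     if "gpt-4o-mini" in model_lower: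
--         return "gpt-4o-mini"
--     if "gpt-4o" in model_lower:
--         return "gpt-4o"
--     if "gpt-4" in model_lower:
--         return "gpt-4-turbo"
--     if "claude" in model_lower and "opus" in model_lower:
--         return "claude-opus-4-6"
--     if "claude" in model_lower and "haiku" in model_lower:
--         return "claude-haiku-4-5"
--     if "claude" in model_lower and ("sonnet" in model_lower or "claude-3" in model_lower):
--         return "claude-sonnet-4-6"
--     if "llama" in model_lower:
--         return "llama3-70b-8192"
--     if "mixtral" in model_lower:
--         return "mixtral-8x7b-32768"
--     return ""
-- ===== SOURCE B (Python) =====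
-- MODEL_COSTS: dict[str, dict[str, float]] = {
--     "claude-opus-4-6":     {"input": 30.0,  "output": 150.0, "cache_read": 3.0,   "cache_write": 7.5},
--     "claude-sonnet-4-6":   {"input": 3.0,   "output": 15.0,  "cache_read": 0.3,   "cache_write": 0.75},
--     "claude-haiku-4-5":    {"input": 0.8,   "output": 4.0,   "cache_read": 0.08,  "cache_write": 0.2},
--     "claude-3-opus":       {"input": 30.0,  "output": 150.0, "cache_read": 3.0,   "cache_write": 7.5},
--     "claude-3-sonnet":     {"input": 3.0,   "output": 15.0,  "cache_read": 0.3,   "cache_write": 0.75},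
--     "claude-3-haiku":      {"input": 0.8,   "output": 4.0,   "cache_read": 0.08,  "cache_write": 0.2},
--     "gpt-4o":              {"input": 5.0,   "output": 15.0,  "cache_read": 2.5,   "cache_write": 0.0},
--     "gpt-4o-mini":         {"input": 0.15,  "output": 0.6,   "cache_read": 0.075, "cache_write": 0.0},
--     "gpt-4-turbo":         {"input": 10.0,  "output": 30.0,  "cache_read": 0.0,   "cache_write": 0.0},
--     "gemini-1.5-pro":      {"input": 3.5,   "output": 10.5,  "cache_read": 0.875, "cache_write": 0.0},
--     "gemini-1.5-flash":    {"input": 0.075, "output": 0.3,   "cache_read": 0.01875, "cache_write": 0.0},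
--     "llama3-70b-8192":     {"input": 0.59,  "output": 0.79,  "cache_read": 0.0,   "cache_write": 0.0},
--     "mixtral-8x7b-32768":  {"input": 0.24,  "output": 0.24,  "cache_read": 0.0,   "cache_write": 0.0},
--     "ollama":              {"input": 0.0,   "output": 0.0,   "cache_read": 0.0,   "cache_write": 0.0},
-- }
--
-- # Substring fallback rules in priority order (the first matching rule is the
-- # one that counts; the loop below scans them back-to-front and overwrites).
-- _PATTERNS: list[tuple[list[str], str]] = [
--     (["ollama"],            "ollama"),
--     (["gemini-1.5-pro"],    "gemini-1.5-pro"),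
--     (["gemini-1.5-flash"],  "gemini-1.5-flash"),
--     (["gpt-4o-mini"],       "gpt-4o-mini"),
--     (["gpt-4o"],            "gpt-4o"),
--     (["gpt-4"],             "gpt-4-turbo"),
--     (["claude", "opus"],    "claude-opus-4-6"),
--     (["claude", "haiku"],   "claude-haiku-4-5"),
--     (["claude", "sonnet"],  "claude-sonnet-4-6"),
--     (["claude-3"],          "claude-sonnet-4-6"),
--     (["llama"],             "llama3-70b-8192"),
--     (["mixtral"],           "mixtral-8x7b-32768"),
-- ]
--
--
-- def _normalize_model(model: str) -> str:
--     """Normalize model name for lookup — longest-prefix match, then patterns."""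
--     ml = model.lower()
--     # Longest-prefix lookup over the cost table: an exact hit is simply the
--     # longest possible prefix, so no separate exact-match step is needed.
--     hits = [key for key in MODEL_COSTS if ml.startswith(key)]
--     if hits:
--         return max(hits, key=len)
--     # Pattern fallback: scan the rules back-to-front, letting higher-priority
--     # rules overwrite lower-priority ones; no early return needed.
--     out = ""
--     for subs, target in reversed(_PATTERNS):
--         if all(s in ml for s in subs):
--             out = target
--     return out
-- ===== Notes on version B (the rewrite author's own statement) =====
-- stated objective: alternative
-- what changed: B replaces A's exact-match branch plus first-match prefix scan by a single longest-prefix lookup (filter the keys that prefix the name, take the longest), and replaces the early-return substring cascade by a back-to-front overwrite fold over an ordered rule table.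
-- intended difference: On model names whose lowercase form strictly extends the key gpt-4o-mini (such as gpt-4o-mini-2024), A returns the shorter key gpt-4o because it wins the first-match prefix scan, while B returns the longest matching key gpt-4o-mini, which is the intended normalization. — e.g. on _normalize_model("gpt-4o-mini-2024"): A returns "gpt-4o", B returns "gpt-4o-mini"
import Mathlib
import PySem

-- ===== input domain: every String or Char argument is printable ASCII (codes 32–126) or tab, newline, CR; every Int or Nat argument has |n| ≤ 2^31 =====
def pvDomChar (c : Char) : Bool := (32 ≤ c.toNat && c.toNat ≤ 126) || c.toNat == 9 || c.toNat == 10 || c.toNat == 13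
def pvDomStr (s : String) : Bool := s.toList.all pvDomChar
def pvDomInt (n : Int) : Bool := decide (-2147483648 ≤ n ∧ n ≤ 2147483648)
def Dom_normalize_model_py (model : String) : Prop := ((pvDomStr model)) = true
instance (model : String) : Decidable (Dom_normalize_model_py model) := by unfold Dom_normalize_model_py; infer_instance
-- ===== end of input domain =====

-- B replaces A's exact-match branch + first-match prefix scan by one longest-prefix
-- lookup, and the early-return substring cascade by a back-to-front overwrite fold;
-- on names strictly extending "gpt-4o-mini" B intentionally returns "gpt-4o-mini"
-- where A returns "gpt-4o" (see D_ below). Return value only; no side effects.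

-- ===== PORT A =====
-- Keys of MODEL_COSTS in insertion order. _normalize_model only reads the keys;
-- the float cost values are unused, so only the keys are ported.
def modelCostKeys : List String :=
  ["claude-opus-4-6", "claude-sonnet-4-6", "claude-haiku-4-5",
   "claude-3-opus", "claude-3-sonnet", "claude-3-haiku",
   "gpt-4o", "gpt-4o-mini", "gpt-4-turbo",
   "gemini-1.5-pro", "gemini-1.5-flash",
   "llama3-70b-8192", "mixtral-8x7b-32768", "ollama"]

def normalize_model_py (model : String) : String :=
  if model = "" then ""
  else
    let ml := PySem.Str.lower model
    -- exact match ("model_lower in MODEL_COSTS")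
    if modelCostKeys.contains ml then ml
    -- prefix match: first key in insertion order with model_lower.startswith(key)
    else match modelCostKeys.find? (fun key => PySem.Str.startswith ml key) with
    | some key => key
    | none =>
      -- pattern-match cascade, branch for branch
      if PySem.Str.isIn "ollama" ml then "ollama"
      else if PySem.Str.isIn "gemini-1.5-pro" ml then "gemini-1.5-pro"
      else if PySem.Str.isIn "gemini-1.5-flash" ml then "gemini-1.5-flash"
      else if PySem.Str.isIn "gpt-4o-mini" ml then "gpt-4o-mini"
      else if PySem.Str.isIn "gpt-4o" ml then "gpt-4o"
      else if PySem.Str.isIn "gpt-4" ml then "gpt-4-turbo"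
      else if PySem.Str.isIn "claude" ml && PySem.Str.isIn "opus" ml then "claude-opus-4-6"
      else if PySem.Str.isIn "claude" ml && PySem.Str.isIn "haiku" ml then "claude-haiku-4-5"
      else if PySem.Str.isIn "claude" ml && (PySem.Str.isIn "sonnet" ml || PySem.Str.isIn "claude-3" ml) then "claude-sonnet-4-6"
      else if PySem.Str.isIn "llama" ml then "llama3-70b-8192"
      else if PySem.Str.isIn "mixtral" ml then "mixtral-8x7b-32768"
      else ""

-- ===== PORT B =====
-- substring fallback rules in priority order (Source B's _PATTERNS)
def patternRules : List (List String × String) :=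
  [(["ollama"],            "ollama"),
   (["gemini-1.5-pro"],    "gemini-1.5-pro"),
   (["gemini-1.5-flash"],  "gemini-1.5-flash"),
   (["gpt-4o-mini"],       "gpt-4o-mini"),
   (["gpt-4o"],            "gpt-4o"),
   (["gpt-4"],             "gpt-4-turbo"),
   (["claude", "opus"],    "claude-opus-4-6"),
   (["claude", "haiku"],   "claude-haiku-4-5"),
   (["claude", "sonnet"],  "claude-sonnet-4-6"),
   (["claude-3"],          "claude-sonnet-4-6"),
   (["llama"],             "llama3-70b-8192"),
   (["mixtral"],           "mixtral-8x7b-32768")]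

def normalize_model_py_alt (model : String) : String :=
  let ml := PySem.Str.lower model
  -- longest-prefix lookup over the cost-table keys (subsumes an exact hit)
  let hits := modelCostKeys.filter (fun key => PySem.Str.startswith ml key)
  if hits.isEmpty then
    -- pattern fallback: back-to-front scan, higher-priority rules overwrite
    (patternRules.reverse).foldl
      (fun out rule => if rule.1.all (fun s => PySem.Str.isIn s ml) then rule.2 else out) ""
  else
    match PySem.List.max? hits (fun k => k.length) with
    | some k => k
    | none => ""   -- unreachable: hits is nonempty

-- ===== PRECONDITION & SPEC =====
-- On names whose lowercase strictly extends "gpt-4o-mini" A returns "gpt-4o"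
-- (the shorter key comes first in its prefix scan) while B returns the longest
-- matching key "gpt-4o-mini", which is the intended normalization.
def D_normalize_model_py (model : String) : Prop :=
  PySem.Str.startswith (PySem.Str.lower model) "gpt-4o-mini" = true ∧
    PySem.Str.lower model ≠ "gpt-4o-mini"
instance (model : String) : Decidable (D_normalize_model_py model) := by
  unfold D_normalize_model_py; infer_instance

def Spec_normalize_model_py (model : String) (out : String) : Prop :=
  ¬ D_normalize_model_py model → out = normalize_model_py_alt model
instance (model : String) (out : String) : Decidable (Spec_normalize_model_py model out) := by
  unfold Spec_normalize_model_py; infer_instance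

def pvDiffWitness_normalize_model_py : String := "gpt-4o-mini-2024"
def pvDiffWitnessOut_normalize_model_py : String × String := ("gpt-4o", "gpt-4o-mini")

-- ===== CLAIM (what is proved, stated in full; the proofs are below) =====
def Claim_unchanged_normalize_model_py : Prop := ∀ (model : String), Dom_normalize_model_py model → Spec_normalize_model_py model (normalize_model_py model)
def Claim_changed_normalize_model_py : Prop := Dom_normalize_model_py (pvDiffWitness_normalize_model_py) ∧ D_normalize_model_py (pvDiffWitness_normalize_model_py) ∧ normalize_model_py (pvDiffWitness_normalize_model_py) = pvDiffWitnessOut_normalize_model_py.1 ∧ normalize_model_py_alt (pvDiffWitness_normalize_model_py) = pvDiffWitnessOut_normalize_model_py.2 ∧ pvDiffWitnessOut_normalize_model_py.1 ≠ pvDiffWitnessOut_normalize_model_py.2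
def Claim_exact_normalize_model_py : Prop := ∀ (model : String), Dom_normalize_model_py model → D_normalize_model_py model → normalize_model_py model ≠ normalize_model_py_alt model

-- ===== LEMMAS AND PROOFS =====

-- a back-to-front overwrite fold computes the FIRST match of the forward list
theorem foldl_reverse_first_match {α β : Type} (l : List α) (f : α → Bool) (g : α → β) (init : β) :
    l.reverse.foldl (fun out r => if f r then g r else out) init
      = (match l.find? f with | some r => g r | none => init) := by
  rw [List.foldl_reverse]
  induction l with
  | nil => rfl
  | cons a t ih =>
    rw [List.foldr_cons, ih, List.find?_cons]
    cases h : f a with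
    | true => simp
    | false => simp

-- filtering by a predicate satisfied by at most one element of a nodup list
-- yields the find? result (as a zero/one-element list)
theorem filter_eq_find_toList {α : Type} (l : List α) (p : α → Bool)
    (hn : l.Nodup) (hu : ∀ a ∈ l, ∀ b ∈ l, p a = true → p b = true → a = b) :
    l.filter p = (l.find? p).toList := by
  induction l with
  | nil => rfl
  | cons a t ih =>
    rcases List.nodup_cons.mp hn with ⟨ha, ht⟩
    cases h : p a with
    | true =>
      have htf : t.filter p = [] := by
        rw [List.filter_eq_nil_iff]
        intro b hb hpb
        exact ha ((hu a (by simp) b (by simp [hb]) h hpb) ▸ hb)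
      simp [h, htf]
    | false =>
      simp only [List.filter_cons, List.find?_cons, h, Bool.false_eq_true, if_false]
      exact ih ht (fun x hx y hy => hu x (by simp [hx]) y (by simp [hy]))

theorem modelCostKeys_nodup : modelCostKeys.Nodup := by decide

-- the only distinct prefix-comparable pair of keys is ("gpt-4o", "gpt-4o-mini")
theorem key_prefix_pairs : ∀ k1 ∈ modelCostKeys, ∀ k2 ∈ modelCostKeys,
    k1.toList <+: k2.toList → k1 = k2 ∨ (k1 = "gpt-4o" ∧ k2 = "gpt-4o-mini") := by decide

-- the only key extending "gpt-4o-mini" is "gpt-4o-mini" itself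
theorem key_gm_ext : ∀ k ∈ modelCostKeys,
    ("gpt-4o-mini" : String).toList <+: k.toList → k = "gpt-4o-mini" := by decide

-- any key that is a prefix of ml is "gpt-4o" or "gpt-4o-mini" when
-- "gpt-4o-mini" is itself a prefix of ml
theorem prefix_mem_of_gm (ml : String)
    (hgm : PySem.Str.startswith ml "gpt-4o-mini" = true) :
    ∀ k ∈ modelCostKeys, PySem.Str.startswith ml k = true →
      k = "gpt-4o" ∨ k = "gpt-4o-mini" := by
  intro k hk hp
  rw [PySem.Str.startswith_eq, PySem.Chars.startswith_iff] at hp hgm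
  rcases List.prefix_or_prefix_of_prefix hp hgm with h | h
  · rcases key_prefix_pairs k hk "gpt-4o-mini" (by decide) h with rfl | ⟨rfl, _⟩
    · exact Or.inr rfl
    · exact Or.inl rfl
  · exact Or.inr (key_gm_ext k hk h)

-- when "gpt-4o-mini" is NOT a prefix of ml, at most one key is a prefix of ml
theorem prefix_unique (ml : String)
    (hs : PySem.Str.startswith ml "gpt-4o-mini" = false) :
    ∀ k1 ∈ modelCostKeys, ∀ k2 ∈ modelCostKeys,
      PySem.Str.startswith ml k1 = true → PySem.Str.startswith ml k2 = true → k1 = k2 := by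
  intro k1 h1 k2 h2 p1 p2
  rw [PySem.Str.startswith_eq, PySem.Chars.startswith_iff] at p1 p2
  have hgm : ¬ ("gpt-4o-mini" : String).toList <+: ml.toList := by
    intro h
    have h' : PySem.Str.startswith ml "gpt-4o-mini" = true := by
      rw [PySem.Str.startswith_eq, PySem.Chars.startswith_iff]; exact h
    rw [h'] at hs; exact Bool.noConfusion hs
  rcases List.prefix_or_prefix_of_prefix p1 p2 with h | h
  · rcases key_prefix_pairs k1 h1 k2 h2 h with rfl | ⟨rfl, rfl⟩
    · rfl
    · exact absurd p2 hgm
  · rcases key_prefix_pairs k2 h2 k1 h1 h with rfl | ⟨rfl, rfl⟩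
    · rfl
    · exact absurd p1 hgm

-- "claude-3" in s implies "claude" in s (the former has the latter as a prefix)
theorem claude3_imp_claude (s : String)
    (h : PySem.Str.isIn "claude-3" s = true) :
    PySem.Str.isIn "claude" s = true := by
  simp only [PySem.Str.isIn_eq, PySem.Chars.isIn_iff_infix] at h ⊢
  exact List.IsInfix.trans (by decide) h

-- A's if-chain cascade equals first-match over the rule table
theorem cascade_eq_find (ml : String) :
    (if PySem.Str.isIn "ollama" ml then "ollama"
      else if PySem.Str.isIn "gemini-1.5-pro" ml then "gemini-1.5-pro"
      else if PySem.Str.isIn "gemini-1.5-flash" ml then "gemini-1.5-flash"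
      else if PySem.Str.isIn "gpt-4o-mini" ml then "gpt-4o-mini"
      else if PySem.Str.isIn "gpt-4o" ml then "gpt-4o"
      else if PySem.Str.isIn "gpt-4" ml then "gpt-4-turbo"
      else if PySem.Str.isIn "claude" ml && PySem.Str.isIn "opus" ml then "claude-opus-4-6"
      else if PySem.Str.isIn "claude" ml && PySem.Str.isIn "haiku" ml then "claude-haiku-4-5"
      else if PySem.Str.isIn "claude" ml && (PySem.Str.isIn "sonnet" ml || PySem.Str.isIn "claude-3" ml) then "claude-sonnet-4-6"
      else if PySem.Str.isIn "llama" ml then "llama3-70b-8192"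
      else if PySem.Str.isIn "mixtral" ml then "mixtral-8x7b-32768"
      else "")
    = (match patternRules.find? (fun rule => rule.1.all (fun s => PySem.Str.isIn s ml)) with
        | some rule => rule.2
        | none => ("" : String)) := by
  simp only [patternRules, List.find?, List.all, Bool.and_true]
  cases h0 : PySem.Str.isIn "ollama" ml with
  | true => simp
  | false =>
    simp only [Bool.false_eq_true, if_false]
    cases h1 : PySem.Str.isIn "gemini-1.5-pro" ml with
    | true => simp
    | false =>
      simp only [Bool.false_eq_true, if_false]
      cases h2 : PySem.Str.isIn "gemini-1.5-flash" ml with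
      | true => simp
      | false =>
        simp only [Bool.false_eq_true, if_false]
        cases h3 : PySem.Str.isIn "gpt-4o-mini" ml with
        | true => simp
        | false =>
          simp only [Bool.false_eq_true, if_false]
          cases h4 : PySem.Str.isIn "gpt-4o" ml with
          | true => simp
          | false =>
            simp only [Bool.false_eq_true, if_false]
            cases h5 : PySem.Str.isIn "gpt-4" ml with
            | true => simp
            | false =>
              simp only [Bool.false_eq_true, if_false]
              cases hcl : PySem.Str.isIn "claude" ml with
              | false =>
                have hc3 : PySem.Str.isIn "claude-3" ml = false := by
                  cases h : PySem.Str.isIn "claude-3" ml with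
                  | false => rfl
                  | true => rw [claude3_imp_claude ml h] at hcl; exact hcl
                cases hll : PySem.Str.isIn "llama" ml <;>
                  cases hmx : PySem.Str.isIn "mixtral" ml <;> simp_all
              | true =>
                cases hop : PySem.Str.isIn "opus" ml with
                | true => simp_all
                | false =>
                cases hhk : PySem.Str.isIn "haiku" ml with
                | true => simp_all
                | false =>
                cases hsn : PySem.Str.isIn "sonnet" ml with
                | true => simp_all
                | false =>
                cases hc3 : PySem.Str.isIn "claude-3" ml <;>
                  cases hll : PySem.Str.isIn "llama" ml <;>
                    cases hmx : PySem.Str.isIn "mixtral" ml <;> simp_all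

-- ===== VERDICT (by name: the statements are the Claim_ definitions above) =====
-- B's longest-prefix hit list reduced to the find? of A's scan (outside D_)
theorem hits_eq (ml : String) (hs : PySem.Str.startswith ml "gpt-4o-mini" = false) :
    modelCostKeys.filter (fun key => PySem.Str.startswith ml key)
      = (modelCostKeys.find? (fun key => PySem.Str.startswith ml key)).toList :=
  filter_eq_find_toList _ _ modelCostKeys_nodup
    (fun a ha b hb pa pb => prefix_unique ml hs a ha b hb pa pb)

theorem normalize_model_py_spec : Claim_unchanged_normalize_model_py := by
  intro model _ hnD
  by_cases hm : model = ""
  · subst hm; decide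
  · simp only [normalize_model_py, normalize_model_py_alt, if_neg hm]
    set ml := PySem.Str.lower model with hml
    by_cases hgm : ml = "gpt-4o-mini"
    · rw [hgm]; decide
    · have hs : PySem.Str.startswith ml "gpt-4o-mini" = false := by
        cases h : PySem.Str.startswith ml "gpt-4o-mini" with
        | false => rfl
        | true =>
          exact absurd (show D_normalize_model_py model from
            ⟨by rw [← hml]; exact h, by rw [← hml]; exact hgm⟩) hnD
      have hu := prefix_unique ml hs
      rw [hits_eq ml hs]
      rcases hf : modelCostKeys.find? (fun key => PySem.Str.startswith ml key) with _ | k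
      · -- no key is a prefix: both sides fall through to the pattern stage
        have hex : modelCostKeys.contains ml = false := by
          rw [List.find?_eq_none] at hf
          cases h : modelCostKeys.contains ml with
          | false => rfl
          | true =>
            have hmem : ml ∈ modelCostKeys := by simpa using h
            have hp : PySem.Str.startswith ml ml = true := by
              rw [PySem.Str.startswith_eq, PySem.Chars.startswith_iff]
            exact absurd hp (by simpa using hf ml hmem)
        simp only [hex, Bool.false_eq_true, if_false, Option.toList, List.isEmpty_nil, if_true]
        rw [foldl_reverse_first_match, cascade_eq_find]
        cases List.find? (fun rule => rule.1.all fun s => PySem.Str.isIn s ml) patternRules <;> rfl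
      · -- exactly one key k is a prefix: A returns it (or the exact match = k), B the max of [k]
        have hk : PySem.Str.startswith ml k = true := by simpa using List.find?_some hf
        have hkmem : k ∈ modelCostKeys := List.mem_of_find?_eq_some hf
        have hmax : PySem.List.max? [k] (fun s => s.length) = some k := rfl
        by_cases hex : ml ∈ modelCostKeys
        · have hpml : PySem.Str.startswith ml ml = true := by
            rw [PySem.Str.startswith_eq, PySem.Chars.startswith_iff]
          have hke : k = ml := hu k hkmem ml hex hk hpml
          subst hke
          simp only [Option.toList, List.isEmpty_cons, Bool.false_eq_true, if_false]
          simp only [List.contains_eq_mem, hex, decide_true, if_true]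
          rw [hmax]
        · simp only [List.contains_eq_mem, hex, decide_false, Bool.false_eq_true, if_false,
            Option.toList, List.isEmpty_cons]
          rw [hmax]

theorem normalize_model_py_changed : Claim_changed_normalize_model_py := by
  unfold Claim_changed_normalize_model_py; decide

theorem normalize_model_py_tight : Claim_exact_normalize_model_py := by
  intro model _ hD
  rcases hD with ⟨hpre, hne⟩
  set ml := PySem.Str.lower model with hml
  have hm : model ≠ "" := by
    intro h; subst h
    rw [show ml = "" from by rw [hml]; rfl] at hpre
    exact Bool.noConfusion hpre
  simp only [normalize_model_py, normalize_model_py_alt, if_neg hm, ← hml]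
  have hmemOr := prefix_mem_of_gm ml hpre
  -- ml is not itself a key
  have hex : modelCostKeys.contains ml = false := by
    cases h : modelCostKeys.contains ml with
    | false => rfl
    | true =>
      have hmem : ml ∈ modelCostKeys := by simpa using h
      have : ("gpt-4o-mini" : String).toList <+: ml.toList := by
        rw [← PySem.Chars.startswith_iff, ← PySem.Str.startswith_eq]; exact hpre
      exact absurd (key_gm_ext ml hmem this) hne
  -- prefix facts for the individual keys
  have hgo : PySem.Str.startswith ml "gpt-4o" = true := by
    have hp : ("gpt-4o-mini" : String).toList <+: ml.toList := by
      rw [← PySem.Chars.startswith_iff, ← PySem.Str.startswith_eq]; exact hpre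
    have hq : ("gpt-4o" : String).toList <+: ml.toList :=
      List.IsPrefix.trans (by decide) hp
    rw [PySem.Str.startswith_eq, PySem.Chars.startswith_iff]; exact hq
  have hF : ∀ k, k ∈ modelCostKeys → k ≠ "gpt-4o" → k ≠ "gpt-4o-mini" →
      PySem.Str.startswith ml k = false := by
    intro k hkm h1 h2
    cases h : PySem.Str.startswith ml k with
    | false => rfl
    | true => rcases hmemOr k hkm h with h' | h' <;> simp [h'] at h1 h2
  have e1 := hF "claude-opus-4-6" (by decide) (by decide) (by decide)
  have e2 := hF "claude-sonnet-4-6" (by decide) (by decide) (by decide)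
  have e3 := hF "claude-haiku-4-5" (by decide) (by decide) (by decide)
  have e4 := hF "claude-3-opus" (by decide) (by decide) (by decide)
  have e5 := hF "claude-3-sonnet" (by decide) (by decide) (by decide)
  have e6 := hF "claude-3-haiku" (by decide) (by decide) (by decide)
  have e7 := hF "gpt-4-turbo" (by decide) (by decide) (by decide)
  have e8 := hF "gemini-1.5-pro" (by decide) (by decide) (by decide)
  have e9 := hF "gemini-1.5-flash" (by decide) (by decide) (by decide)
  have e10 := hF "llama3-70b-8192" (by decide) (by decide) (by decide)
  have e11 := hF "mixtral-8x7b-32768" (by decide) (by decide) (by decide)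
  have e12 := hF "ollama" (by decide) (by decide) (by decide)
  simp at e1 e2 e3 e4 e5 e6 e7 e8 e9 e10 e11 e12 hgo hpre
  -- A's scan stops at "gpt-4o"; B's hit list is both gpt keys, the longer wins
  have hfind : List.find? (fun key => PySem.Chars.startswith ml.toList key.toList) modelCostKeys
      = some "gpt-4o" := by
    simp [modelCostKeys, List.find?, e1, e2, e3, e4, e5, e6, hgo]
  have hfil : List.filter (fun key => PySem.Chars.startswith ml.toList key.toList) modelCostKeys
      = ["gpt-4o", "gpt-4o-mini"] := by
    simp [modelCostKeys, List.filter, e1, e2, e3, e4, e5, e6, e7, e8, e9, e10, e11, e12, hgo, hpre]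
  have hexm : ml ∉ modelCostKeys := by simpa using hex
  have hmax : PySem.List.max? ["gpt-4o", "gpt-4o-mini"] (fun s => s.length)
      = some "gpt-4o-mini" := by decide
  simp [hexm, hfind, hfil, hmax]
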